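-- pv_equiv track=rewrite | github.com/MetalGuru434/lottery-predictor | lottery_predictor.py | count_consecutive_pairs
-- ===== SOURCE A (Python) =====
-- def count_consecutive_pairs(numbers):
--     """Подсчет пар смежных чисел"""
--     numbers = sorted(numbers)
--     pairs = 0
--     i = 0
--     while i < len(numbers) - 1:
--         if numbers[i+1] - numbers[i] == 1:
--             pairs += 1
--             i += 2  # Пропускаем следующее число (уже в паре)
--         else:
--             i += 1
--     return pairs
-- ===== SOURCE B (Python) =====
-- def count_consecutive_pairs(numbers):
--     """Подсчет пар смежных чисел: partition the sorted list into maximal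
--     runs of consecutive integers and add L // 2 per run of length L."""
--     numbers = sorted(numbers)
--     if not numbers:
--         return 0
--     total = 0
--     run = 1
--     for prev, cur in zip(numbers, numbers[1:]):
--         if cur - prev == 1:
--             run += 1
--         else:
--             total += run // 2
--             run = 1
--     return total + run // 2
-- ===== Notes on version B (the rewrite author's own statement) =====
-- stated objective: alternative
-- what changed: A greedily scans the sorted list with an index that jumps by 2 whenever a consecutive pair is taken; B instead partitions the sorted list into maximal runs of consecutive integers (one zip pass over adjacent pairs) and sums floor(L/2) over run lengths L.
import Mathlib
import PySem

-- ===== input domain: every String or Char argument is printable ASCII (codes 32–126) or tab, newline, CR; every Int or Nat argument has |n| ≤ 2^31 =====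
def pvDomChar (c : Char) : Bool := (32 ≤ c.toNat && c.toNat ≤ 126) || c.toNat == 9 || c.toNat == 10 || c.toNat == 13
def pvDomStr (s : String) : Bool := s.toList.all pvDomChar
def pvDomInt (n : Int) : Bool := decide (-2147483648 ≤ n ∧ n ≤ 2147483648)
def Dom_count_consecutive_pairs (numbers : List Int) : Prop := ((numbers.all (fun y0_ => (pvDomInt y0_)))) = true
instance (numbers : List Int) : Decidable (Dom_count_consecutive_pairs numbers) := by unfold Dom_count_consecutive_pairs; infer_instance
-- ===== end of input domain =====

-- B replaces A's greedy skip-by-2 index scan with a run-partition of the sorted list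
-- (objective: alternative decomposition of the same O(n log n) task).

-- ===== PORT A =====
-- A's while loop over index i; the suffix of the sorted list starting at i is the state:
-- i += 2 drops two elements, i += 1 drops one, the loop stops when fewer than 2 remain.
def pvAloop : List Int → Int → Int
  | [], pairs => pairs
  | [_], pairs => pairs
  | x :: y :: rest, pairs =>
      if y - x = 1 then pvAloop rest (pairs + 1) else pvAloop (y :: rest) pairs

def count_consecutive_pairs (numbers : List Int) : Int :=
  pvAloop (PySem.List.sorted numbers (fun x => x) false) 0

-- ===== PORT B =====
-- B's for-loop over zip(numbers, numbers[1:]) with accumulators total and run: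
-- prev is the previous element, run the length of the current maximal run.
def pvBloop (total run prev : Int) : List Int → Int
  | [] => total + PySem.Int.floordiv run 2
  | cur :: rest =>
      if cur - prev = 1 then pvBloop total (run + 1) cur rest
      else pvBloop (total + PySem.Int.floordiv run 2) 1 cur rest

def count_consecutive_pairs_alt (numbers : List Int) : Int :=
  match PySem.List.sorted numbers (fun x => x) false with
  | [] => 0
  | x :: rest => pvBloop 0 1 x rest

-- ===== PRECONDITION & SPEC =====
def Spec_count_consecutive_pairs (numbers : List Int) (out : Int) : Prop := out = count_consecutive_pairs_alt numbers
instance (numbers : List Int) (out : Int) : Decidable (Spec_count_consecutive_pairs numbers out) := by unfold Spec_count_consecutive_pairs; infer_instance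

-- ===== CLAIM (what is proved, stated in full; the proofs are below) =====
def Claim_equal_count_consecutive_pairs : Prop := ∀ (numbers : List Int), Dom_count_consecutive_pairs numbers → Spec_count_consecutive_pairs numbers (count_consecutive_pairs numbers)

-- ===== LEMMAS AND PROOFS =====

-- B's result starting from a nonempty list (helper for the proofs only).
def pvBmain : List Int → Int
  | [] => 0
  | x :: rest => pvBloop 0 1 x rest

-- The total accumulator factors out of pvBloop.
theorem pvBloop_acc (rest : List Int) : ∀ (total run prev : Int),
    pvBloop total run prev rest = total + pvBloop 0 run prev rest := by
  induction rest with
  | nil => intro total run prev; simp [pvBloop]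
  | cons cur r ih =>
      intro total run prev
      simp only [pvBloop]
      split_ifs with h
      · rw [ih, ih 0]
      · rw [ih, ih (0 + _)]; ring

-- Adding 2*k to the pending run length adds k pairs.
theorem pvBloop_run_shift (rest : List Int) : ∀ (prev run k : Int),
    pvBloop 0 (run + 2 * k) prev rest = k + pvBloop 0 run prev rest := by
  induction rest with
  | nil =>
      intro prev run k
      simp only [pvBloop,
        PySem.Int.floordiv_eq_ediv_of_pos (a := run + 2 * k) (b := 2) (by norm_num),
        PySem.Int.floordiv_eq_ediv_of_pos (a := run) (b := 2) (by norm_num)]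
      omega
  | cons cur r ih =>
      intro prev run k
      simp only [pvBloop]
      split_ifs with h
      · have h1 := ih cur (run + 1) k
        rw [show run + 2 * k + 1 = run + 1 + 2 * k by ring, h1]
      · rw [pvBloop_acc, pvBloop_acc r (0 + _)]
        simp only [PySem.Int.floordiv_eq_ediv_of_pos (a := run + 2 * k) (b := 2) (by norm_num),
          PySem.Int.floordiv_eq_ediv_of_pos (a := run) (b := 2) (by norm_num)]
        omega

-- A pending run of length 2 is one completed pair plus a fresh start.
theorem pvBloop_two (r : List Int) (y : Int) : pvBloop 0 2 y r = 1 + pvBmain r := by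
  have h22 : PySem.Int.floordiv 2 2 = 1 := by decide
  cases r with
  | nil => simp [pvBloop, pvBmain]
  | cons z r' =>
      simp only [pvBloop, pvBmain]
      split_ifs with h
      · have h1 := pvBloop_run_shift r' z 1 1
        rw [show (2 : Int) + 1 = 1 + 2 * 1 by norm_num, h1]
      · rw [pvBloop_acc, h22]; simp

-- A's greedy scan computes, above its accumulator, exactly B's run count.
theorem pvAloop_eq_pvBmain (xs : List Int) (p : Int) : pvAloop xs p = p + pvBmain xs := by
  have h12 : PySem.Int.floordiv 1 2 = 0 := by decide
  induction xs, p using pvAloop.induct with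
  | case1 p => simp [pvAloop, pvBmain]
  | case2 x p => simp [pvAloop, pvBmain, pvBloop]
  | case3 x y rest p h ih =>
      simp only [pvAloop, h, if_pos]
      rw [ih]
      show p + 1 + pvBmain rest = p + pvBloop 0 1 x (y :: rest)
      simp only [pvBloop, h, if_pos]
      rw [show (1 : Int) + 1 = 2 from by norm_num, pvBloop_two]
      ring
  | case4 x y rest p h ih =>
      simp only [pvAloop, h, if_neg, not_false_iff]
      rw [ih]
      congr 1
      show pvBloop 0 1 y rest = pvBloop 0 1 x (y :: rest)
      simp only [pvBloop, h, if_neg, not_false_iff, h12]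
      rw [pvBloop_acc rest (0 + 0)]
      ring

-- ===== VERDICT (by name: the statement is the Claim_ definition above) =====
theorem count_consecutive_pairs_spec : Claim_equal_count_consecutive_pairs := by
  intro numbers _
  unfold Spec_count_consecutive_pairs count_consecutive_pairs count_consecutive_pairs_alt
  rw [pvAloop_eq_pvBmain]
  cases PySem.List.sorted numbers (fun x => x) false <;> simp [pvBmain]
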